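-- pv_equiv track=rewrite | github.com/DNAstorage-iSynBio/IM-Codec | met_dna_storage.py | outPutSeq
-- ===== SOURCE A (Python) =====
-- nt_dic = {"0": "A", "1": "C", "2": "G", "3": "T"}
--
-- met_tag = "Z"
--
-- def siJinZhi(x:int) -> str:
-- 	'''
-- 	description: 十进制数转为四进制，并根据对应关系转换为碱基序列
-- 	param x: 十进制数
-- 	return: 对应四进制数的碱基序列
-- 	'''
--
-- 	sijinzhi_list = []
-- 	while x > 3:
-- 		sijinzhi_list.append(str(x % 4))
-- 		x //= 4
-- 	sijinzhi_list.append(str(x))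
--
-- 	sijinzhi_list = [nt_dic[i] for i in sijinzhi_list]
-- 	nt_seq = "".join(reversed(sijinzhi_list))
-- 	return nt_seq
--
-- def outPutSeq(comp_seq, count_list):
-- 	decode_seq_list, info_seq = [], ""
-- 	set_len = 0
-- 	for i in range(len(count_list)):
-- 		_count = count_list[i]
-- 		_nt = comp_seq[i]
--
-- 		if _count == 1:
-- 			info_seq += _nt
-- 		else:
-- 			_count_seq = siJinZhi(_count)
-- 			decode_seq_list.append(_count_seq)
-- 			if len(_count_seq) > set_len:
-- 				set_len = len(_count_seq)
--
-- 			info_seq += met_tag + _nt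
--
-- 	decode_seq_list = [nt_dic["0"]*(set_len - len(i)) + i for i in decode_seq_list]
-- 	decode_seq = "".join(decode_seq_list)
--
-- 	return decode_seq, info_seq,
-- ===== SOURCE B (Python) =====
-- nt_dic = {"0": "A", "1": "C", "2": "G", "3": "T"}
--
-- met_tag = "Z"
--
--
-- def siJinZhi(x: int) -> str:
--     # recursive base-4 encoding, most significant digit first
--     if x > 3:
--         return siJinZhi(x // 4) + nt_dic[str(x % 4)]
--     return nt_dic[str(x)]
--
--
-- def outPutSeq(comp_seq, count_list):
--     # global pad width from the maximum encodable count, computed up front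
--     encodable = [c for c in count_list if c != 1]
--     set_len = len(siJinZhi(max(encodable))) if encodable else 0
--
--     info_parts, decode_parts = [], []
--     for _nt, _count in zip(comp_seq, count_list):
--         if _count == 1:
--             info_parts.append(_nt)
--         else:
--             s = siJinZhi(_count)
--             decode_parts.append("A" * (set_len - len(s)) + s)
--             info_parts.append(met_tag + _nt)
--     return "".join(decode_parts), "".join(info_parts)
-- ===== Notes on version B (the rewrite author's own statement) =====
-- stated objective: alternative
-- what changed: B computes the global padding width up front from the maximum non-1 count (digit length is monotone), then builds both outputs in a single zip pass that pads each encoding in place, replacing A's running-max accumulator and its separate re-padding pass over the collected encodings; siJinZhi is rewritten as direct recursion instead of a digit list that is mapped and reversed.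
import Mathlib
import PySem

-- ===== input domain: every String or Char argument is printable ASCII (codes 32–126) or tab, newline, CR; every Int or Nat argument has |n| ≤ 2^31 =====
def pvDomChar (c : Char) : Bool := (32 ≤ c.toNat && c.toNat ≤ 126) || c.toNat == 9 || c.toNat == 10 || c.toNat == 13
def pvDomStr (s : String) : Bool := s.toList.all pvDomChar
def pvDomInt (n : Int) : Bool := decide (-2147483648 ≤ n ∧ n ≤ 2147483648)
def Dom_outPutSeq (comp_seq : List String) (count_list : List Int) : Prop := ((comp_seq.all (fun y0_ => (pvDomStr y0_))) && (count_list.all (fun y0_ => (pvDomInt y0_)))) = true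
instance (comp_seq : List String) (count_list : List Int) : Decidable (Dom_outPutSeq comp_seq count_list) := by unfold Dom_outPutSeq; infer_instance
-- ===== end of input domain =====

-- B computes the padding width up front from the maximum non-1 count and pads in one zip pass
-- (alternative decomposition, same asymptotic cost); equivalence is about the return value only.

-- ===== PORT A =====
def nt_dic : PySem.Dict String String := PySem.Dict.mk [("0", "A"), ("1", "C"), ("2", "G"), ("3", "T")]

def met_tag : String := "Z"

-- s * n  (Python string repetition; exact: n ≤ 0 gives "")
def strMul (s : String) (n : Int) : String := PySem.Str.join "" (List.replicate n.toNat s)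

-- the while-loop of siJinZhi, collecting the str(x % 4) digits in loop order
def sijinzhiLoop (x : Int) (acc : List String) : List String :=
  if 3 < x then
    sijinzhiLoop (PySem.Int.floordiv x 4) (acc ++ [PySem.Int.toStr (PySem.Int.mod x 4)])
  else acc ++ [PySem.Int.toStr x]
termination_by x.toNat
decreasing_by
  rw [PySem.Int.floordiv_eq_ediv_of_pos (by omega)]
  omega

def siJinZhi (x : Int) : String :=
  PySem.Str.join "" (((sijinzhiLoop x []).map (fun i => nt_dic.getD i "")).reverse)

-- the body of A's for-loop (nt_dic KeyError / comp_seq IndexError are outside Pre_)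
def loopA (st : List String × String × Int) (_nt : String) (_count : Int) :
    List String × String × Int :=
  if _count = 1 then (st.1, st.2.1 ++ _nt, st.2.2)
  else
    (st.1 ++ [siJinZhi _count],
     st.2.1 ++ met_tag ++ _nt,
     if st.2.2 < PySem.Str.len (siJinZhi _count) then PySem.Str.len (siJinZhi _count)
     else st.2.2)

def outPutSeq (comp_seq : List String) (count_list : List Int) : String × String :=
  let st := (PySem.List.pyRange 0 (count_list.length : Int) 1).foldl
    (fun st i => loopA st (PySem.List.pyGetD comp_seq i "") (PySem.List.pyGetD count_list i 0))
    ([], "", (0 : Int))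
  let dsl := st.1.map (fun i => strMul (nt_dic.getD "0" "") (st.2.2 - PySem.Str.len i) ++ i)
  (PySem.Str.join "" dsl, st.2.1)

-- ===== PORT B =====
def siJinZhi_alt (x : Int) : String :=
  if 3 < x then
    siJinZhi_alt (PySem.Int.floordiv x 4) ++ nt_dic.getD (PySem.Int.toStr (PySem.Int.mod x 4)) ""
  else nt_dic.getD (PySem.Int.toStr x) ""
termination_by x.toNat
decreasing_by
  rw [PySem.Int.floordiv_eq_ediv_of_pos (by omega)]
  omega

-- the body of B's zip pass, with the precomputed pad width
def loopB (set_len : Int) (st : List String × List String) (p : String × Int) :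
    List String × List String :=
  if p.2 = 1 then (st.1 ++ [p.1], st.2)
  else
    (st.1 ++ [met_tag ++ p.1],
     st.2 ++ [strMul "A" (set_len - PySem.Str.len (siJinZhi_alt p.2)) ++ siJinZhi_alt p.2])

def outPutSeq_alt (comp_seq : List String) (count_list : List Int) : String × String :=
  let encodable := count_list.filter (fun c => !(c == 1))
  let set_len : Int :=
    match PySem.List.max? encodable (fun c => c) with
    | some m => PySem.Str.len (siJinZhi_alt m)
    | none => 0
  let st := (comp_seq.zip count_list).foldl (loopB set_len) ([], [])
  (PySem.Str.join "" st.2, PySem.Str.join "" st.1)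

-- ===== PRECONDITION & SPEC =====
-- Pre_ is exactly the inputs on which Python A returns: comp_seq[i] must exist for every index
-- of count_list (else IndexError) and every count must be nonnegative (a negative count is ≠ 1
-- and siJinZhi then looks up a key like "-1" in nt_dic: KeyError).
def Pre_outPutSeq (comp_seq : List String) (count_list : List Int) : Prop :=
  count_list.length ≤ comp_seq.length ∧ ∀ c ∈ count_list, 0 ≤ c
instance (comp_seq : List String) (count_list : List Int) : Decidable (Pre_outPutSeq comp_seq count_list) := by unfold Pre_outPutSeq; infer_instance

def pvWitness_outPutSeq : List String × List Int := (["A", "C", "G"], [1, 2, 5])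

def Spec_outPutSeq (comp_seq : List String) (count_list : List Int) (out : String × String) : Prop := out = outPutSeq_alt comp_seq count_list
instance (comp_seq : List String) (count_list : List Int) (out : String × String) : Decidable (Spec_outPutSeq comp_seq count_list out) := by unfold Spec_outPutSeq; infer_instance

-- ===== CLAIM (what is proved, stated in full; the proofs are below) =====
def Claim_equal_outPutSeq : Prop := ∀ (comp_seq : List String) (count_list : List Int), Dom_outPutSeq comp_seq count_list → Pre_outPutSeq comp_seq count_list → Spec_outPutSeq comp_seq count_list (outPutSeq comp_seq count_list)

-- ===== LEMMAS AND PROOFS =====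

theorem join_nil_str : PySem.Str.join "" ([] : List String) = "" := by
  simp [PySem.Str.join, PySem.Chars.join, List.intercalate]

theorem join_cons_str (s : String) (t : List String) :
    PySem.Str.join "" (s :: t) = s ++ PySem.Str.join "" t := by
  apply String.toList_injective
  simp [PySem.Str.join, PySem.Chars.join, List.intercalate]
  cases t <;> simp

theorem join_append_singleton (l : List String) (s : String) :
    PySem.Str.join "" (l ++ [s]) = PySem.Str.join "" l ++ s := by
  induction l with
  | nil => simp [join_nil_str, join_cons_str]
  | cons a t ih => simp [join_cons_str, ih, String.append_assoc]

theorem sijinzhiLoop_prefix (x : Int) (b a : List String) :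
    sijinzhiLoop x (a ++ b) = a ++ sijinzhiLoop x b := by
  fun_induction sijinzhiLoop x b generalizing a with
  | case1 x b h ih => rw [sijinzhiLoop, if_pos h, List.append_assoc, ih]
  | case2 x b h => rw [sijinzhiLoop, if_neg h, List.append_assoc]

theorem siJinZhi_eq_alt (x : Int) : siJinZhi x = siJinZhi_alt x := by
  fun_induction siJinZhi_alt x with
  | case1 x h ih =>
    rw [siJinZhi, sijinzhiLoop, if_pos h,
        show ([] : List String) ++ [PySem.Int.toStr (PySem.Int.mod x 4)]
           = [PySem.Int.toStr (PySem.Int.mod x 4)] ++ [] from by simp,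
        sijinzhiLoop_prefix]
    simp only [List.map_append, List.map_cons, List.map_nil, List.reverse_append,
      List.reverse_cons, List.reverse_nil, List.nil_append]
    rw [join_append_singleton, ← siJinZhi, ih]
  | case2 x h =>
    rw [siJinZhi, sijinzhiLoop, if_neg h]
    simp [join_cons_str, join_nil_str]

theorem len_digit (x : Int) (h0 : 0 ≤ x) (h3 : x ≤ 3) :
    PySem.Str.len (nt_dic.getD (PySem.Int.toStr x) "") = 1 := by
  interval_cases x <;> decide

theorem len_alt_pos (x : Int) (h : 0 ≤ x) : 1 ≤ PySem.Str.len (siJinZhi_alt x) := by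
  rw [siJinZhi_alt]
  split_ifs with h4
  · rw [PySem.Str.len_append,
      len_digit _ (PySem.Int.mod_nonneg x (by omega))
        (by have := PySem.Int.mod_lt x (b := 4) (by omega); omega)]
    have hnn : 0 ≤ PySem.Str.len (siJinZhi_alt (PySem.Int.floordiv x 4)) := by simp
    omega
  · rw [len_digit x h (by omega)]

theorem len_alt_mono_aux : ∀ (n : Nat) (a b : Int), b.toNat = n → 0 ≤ a → a ≤ b →
    PySem.Str.len (siJinZhi_alt a) ≤ PySem.Str.len (siJinZhi_alt b) := by
  intro n
  induction n using Nat.strong_induction_on with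
  | _ n ih =>
    intro a b hn ha hab
    by_cases hb4 : 3 < b
    · rw [show siJinZhi_alt b = siJinZhi_alt (PySem.Int.floordiv b 4)
            ++ nt_dic.getD (PySem.Int.toStr (PySem.Int.mod b 4)) "" from by
          rw [siJinZhi_alt]; rw [if_pos hb4],
        PySem.Str.len_append,
        len_digit _ (PySem.Int.mod_nonneg b (by omega))
          (by have := PySem.Int.mod_lt b (b := 4) (by omega); omega)]
      by_cases ha4 : 3 < a
      · rw [show siJinZhi_alt a = siJinZhi_alt (PySem.Int.floordiv a 4)
              ++ nt_dic.getD (PySem.Int.toStr (PySem.Int.mod a 4)) "" from by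
            rw [siJinZhi_alt]; rw [if_pos ha4],
          PySem.Str.len_append,
          len_digit _ (PySem.Int.mod_nonneg a (by omega))
            (by have := PySem.Int.mod_lt a (b := 4) (by omega); omega)]
        have h1 : PySem.Int.floordiv a 4 = a / 4 := PySem.Int.floordiv_eq_ediv_of_pos (by omega)
        have h2 : PySem.Int.floordiv b 4 = b / 4 := PySem.Int.floordiv_eq_ediv_of_pos (by omega)
        have := ih (b/4).toNat (by omega) (a/4) (b/4) rfl (by omega) (by omega)
        rw [h1, h2]
        omega
      · have := len_alt_pos (PySem.Int.floordiv b 4)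
          (by rw [PySem.Int.floordiv_eq_ediv_of_pos (by omega)]; omega)
        rw [show siJinZhi_alt a = nt_dic.getD (PySem.Int.toStr a) "" from by
            rw [siJinZhi_alt]; rw [if_neg ha4],
          len_digit a ha (by omega)]
        omega
    · rw [show siJinZhi_alt a = nt_dic.getD (PySem.Int.toStr a) "" from by
          rw [siJinZhi_alt]; rw [if_neg (by omega : ¬ 3 < a)],
        show siJinZhi_alt b = nt_dic.getD (PySem.Int.toStr b) "" from by
          rw [siJinZhi_alt]; rw [if_neg hb4],
        len_digit a ha (by omega), len_digit b (by omega) (by omega)]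

theorem len_alt_mono (a b : Int) (ha : 0 ≤ a) (hab : a ≤ b) :
    PySem.Str.len (siJinZhi_alt a) ≤ PySem.Str.len (siJinZhi_alt b) :=
  len_alt_mono_aux b.toNat a b rfl ha hab

-- running max with 'if m < a then a else m' over a list containing an upper bound v
theorem foldmax_eq (l : List Int) (v : Int) :
    ∀ m : Int, (∀ x ∈ l, x ≤ v) → (v ∈ l ∨ m = v) → m ≤ v →
    l.foldl (fun m a => if m < a then a else m) m = v := by
  induction l with
  | nil =>
    intro m _ hd _
    rcases hd with h | h
    · exact absurd h (List.not_mem_nil)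
    · simpa using h
  | cons x t ih =>
    intro m hall hd hm
    simp only [List.foldl_cons]
    by_cases hvt : v ∈ t
    · exact ih _ (fun y hy => hall y (List.mem_cons_of_mem _ hy)) (Or.inl hvt)
        (by have hx := hall x (List.mem_cons_self); split_ifs <;> omega)
    · have hx : x ≤ v := hall x (List.mem_cons_self)
      have hmv : (if m < x then x else m) = v := by
        rcases hd with h | h
        · rcases List.mem_cons.mp h with h | h
          · subst h; split_ifs <;> omega
          · exact absurd h hvt
        · subst h; split_ifs <;> omega
      exact ih _ (fun y hy => hall y (List.mem_cons_of_mem _ hy)) (Or.inr hmv) (le_of_eq hmv)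

theorem foldl_range_getD {σ : Type} (g : σ → String → Int → σ) :
    ∀ (ys : List Int) (xs : List String) (init : σ), ys.length ≤ xs.length →
    (List.range ys.length).foldl
      (fun acc k => g acc (xs.getD k "") (ys.getD k 0)) init
    = (xs.zip ys).foldl (fun acc p => g acc p.1 p.2) init := by
  intro ys
  induction ys with
  | nil => intro xs init h; simp
  | cons y t ih =>
    intro xs init h
    cases xs with
    | nil => simp at h
    | cons x xt =>
      have h2 : t.length ≤ xt.length := by simpa using h
      rw [List.length_cons, List.range_succ_eq_map, List.foldl_cons, List.foldl_map,
          List.zip_cons_cons, List.foldl_cons]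
      simp only [List.getD_cons_zero, List.getD_cons_succ]
      exact ih xt (g init x y) h2

-- A's index loop over range(len(count_list)) is the fold over the zipped pairs
theorem fold_range_zip {σ : Type} (g : σ → String → Int → σ)
    (ys : List Int) (xs : List String) (init : σ) (h : ys.length ≤ xs.length) :
    (PySem.List.pyRange 0 (ys.length : Int) 1).foldl
      (fun acc j => g acc (PySem.List.pyGetD xs j "") (PySem.List.pyGetD ys j 0)) init
    = (xs.zip ys).foldl (fun acc p => g acc p.1 p.2) init := by
  rw [PySem.List.pyRange_zero_nat, List.foldl_map]
  simp only [PySem.List.pyGetD_natCast]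
  exact foldl_range_getD g ys xs init h

theorem filter_snd_zip (p : Int → Bool) : ∀ (ys : List Int) (xs : List String),
    ys.length ≤ xs.length →
    ((xs.zip ys).filter (fun q => p q.2)).map (fun q => q.2) = ys.filter p := by
  intro ys
  induction ys with
  | nil => intro xs h; simp
  | cons y t ih =>
    intro xs h
    cases xs with
    | nil => simp at h
    | cons x xt =>
      have h2 : t.length ≤ xt.length := by simpa using h
      rw [List.zip_cons_cons, List.filter_cons, List.filter_cons]
      by_cases hp : p y
      · simp [hp, ih xt h2]
      · simp [hp, ih xt h2]

def partFn (q : String × Int) : String := if q.2 = 1 then q.1 else met_tag ++ q.1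

theorem foldA_spec (l : List (String × Int)) :
    ∀ (d : List String) (s : String) (m : Int),
    l.foldl (fun st p => loopA st p.1 p.2) (d, s, m) =
      (d ++ (l.filter (fun q => !(q.2 == 1))).map (fun q => siJinZhi q.2),
       s ++ PySem.Str.join "" (l.map partFn),
       ((l.filter (fun q => !(q.2 == 1))).map
          (fun q => PySem.Str.len (siJinZhi q.2))).foldl
         (fun m a => if m < a then a else m) m) := by
  induction l with
  | nil => intro d s m; simp [join_nil_str]
  | cons q t ih =>
    intro d s m
    rw [List.foldl_cons]
    by_cases hq : q.2 = 1
    · rw [show loopA (d, s, m) q.1 q.2 = (d, s ++ q.1, m) from by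
          rw [loopA]; rw [if_pos hq],
        ih]
      simp only [List.filter_cons, List.map_cons, partFn, join_cons_str]
      simp [hq, String.append_assoc]
    · rw [show loopA (d, s, m) q.1 q.2
          = (d ++ [siJinZhi q.2], s ++ met_tag ++ q.1,
             if m < PySem.Str.len (siJinZhi q.2) then PySem.Str.len (siJinZhi q.2) else m)
          from by rw [loopA]; rw [if_neg hq],
        ih]
      simp only [List.filter_cons, List.map_cons, partFn, join_cons_str]
      simp [hq, String.append_assoc]

theorem foldB_spec (L : Int) (l : List (String × Int)) :
    ∀ (ip dp : List String),
    l.foldl (loopB L) (ip, dp) =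
      (ip ++ l.map partFn,
       dp ++ (l.filter (fun q => !(q.2 == 1))).map
         (fun q => strMul "A" (L - PySem.Str.len (siJinZhi_alt q.2)) ++ siJinZhi_alt q.2)) := by
  induction l with
  | nil => intro ip dp; simp
  | cons q t ih =>
    intro ip dp
    rw [List.foldl_cons]
    by_cases hq : q.2 = 1
    · simp only [loopB, if_pos hq, ih, List.filter_cons, List.map_cons, partFn, hq]
      simp
    · simp only [loopB, if_neg hq, ih, List.filter_cons, List.map_cons, partFn]
      simp [hq]

-- ===== VERDICT (by name: the statement is the Claim_ definition above) =====
theorem outPutSeq_spec : Claim_equal_outPutSeq := by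
  intro comp_seq count_list _hdom hpre
  obtain ⟨hlen, hnn⟩ := hpre
  unfold Spec_outPutSeq
  simp only [outPutSeq, outPutSeq_alt]
  rw [fold_range_zip loopA count_list comp_seq _ hlen]
  rw [show (fun (acc : List String × String × Int) (p : String × Int) => loopA acc p.1 p.2)
        = (fun st p => loopA st p.1 p.2) from rfl]
  rw [foldA_spec, foldB_spec]
  simp only [List.nil_append, List.map_map]
  -- identify the two pad widths
  have hsnd : ((comp_seq.zip count_list).filter (fun q => !(q.2 == 1))).map (fun q => q.2)
      = count_list.filter (fun c => !(c == 1)) :=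
    filter_snd_zip (fun c => !(c == 1)) count_list comp_seq hlen
  have hM : (((comp_seq.zip count_list).filter (fun q => !(q.2 == 1))).map
        (fun q => PySem.Str.len (siJinZhi q.2))).foldl
         (fun m a => if m < a then a else m) 0
      = (match PySem.List.max? (count_list.filter (fun c => !(c == 1))) (fun c => c) with
         | some m => PySem.Str.len (siJinZhi_alt m)
         | none => (0 : Int)) := by
    cases hmax : PySem.List.max? (count_list.filter (fun c => !(c == 1))) (fun c => c) with
    | none =>
      have hnil : count_list.filter (fun c => !(c == 1)) = [] :=
        (PySem.List.max?_eq_none_iff _ _).mp hmax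
      have hz : (comp_seq.zip count_list).filter (fun q => !(q.2 == 1)) = [] := by
        have h := hsnd
        rw [hnil] at h
        exact List.map_eq_nil_iff.mp h
      rw [hz]
      simp
    | some mx =>
      have hmem : mx ∈ count_list.filter (fun c => !(c == 1)) := PySem.List.max?_mem hmax
      have hismax := PySem.List.max?_isMax hmax
      show _ = PySem.Str.len (siJinZhi_alt mx)
      simp only [siJinZhi_eq_alt]
      apply foldmax_eq
      · intro a ha
        obtain ⟨q, hqm, rfl⟩ := List.mem_map.mp ha
        have hq2mem : q.2 ∈ count_list.filter (fun c => !(c == 1)) := by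
          rw [← hsnd]
          exact List.mem_map_of_mem hqm
        have h0 : 0 ≤ q.2 := hnn _ (List.mem_of_mem_filter hq2mem)
        exact len_alt_mono _ _ h0 (hismax _ hq2mem)
      · left
        have hmx : mx ∈ ((comp_seq.zip count_list).filter
            (fun q => !(q.2 == 1))).map (fun q => q.2) := hsnd ▸ hmem
        obtain ⟨q, hqm, hq2⟩ := List.mem_map.mp hmx
        exact List.mem_map.mpr ⟨q, hqm, by rw [hq2]⟩
      · simp
  rw [hM]
  congr 1
  congr 1
  apply List.map_congr_left
  intro q hq
  simp only [Function.comp_apply]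
  rw [siJinZhi_eq_alt, show nt_dic.getD "0" "" = "A" from by decide]
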